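-- pv_equiv track=rewrite | github.com/qkleinfelter/AdventOfCode2019 | solutions/day4.py | is_valid_pass_p2
-- ===== SOURCE A (Python) =====
-- import collections, time
--
-- def is_valid_pass_p2(num, lower, upper):
--     if(len(str(num)) != 6):
--         return False
--     if(num < lower or num > upper):
--         return False
--     strnum = str(num)
--     lastnum = strnum[0]
--     cnt = collections.Counter()
--     for c in strnum:
--         if int(c) < int(lastnum):
--             return False
--         cnt[c] += 1
--         lastnum = c
--     counts = cnt.most_common()
--     for count in counts:
--         if count[1] == 2:
--             return True
--     return False
-- ===== SOURCE B (Python) =====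
-- def is_valid_pass_p2(num, lower, upper):
--     s = str(num)
--     if len(s) != 6:
--         return False
--     if num < lower or num > upper:
--         return False
--     has_double = False
--     run = 1
--     for a, b in zip(s, s[1:]):
--         if int(b) < int(a):
--             return False
--         if b == a:
--             run += 1
--         else:
--             if run == 2:
--                 has_double = True
--             run = 1
--     return has_double or run == 2
-- ===== Notes on version B (the rewrite author's own statement) =====
-- stated objective: simpler
-- what changed: Replaced the Counter + most_common scan for an exactly-2 group by a single pass over adjacent character pairs that fuses the non-decrease check with run-length tracking (run lengths coincide with character counts on a non-decreasing string).
import Mathlib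
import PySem

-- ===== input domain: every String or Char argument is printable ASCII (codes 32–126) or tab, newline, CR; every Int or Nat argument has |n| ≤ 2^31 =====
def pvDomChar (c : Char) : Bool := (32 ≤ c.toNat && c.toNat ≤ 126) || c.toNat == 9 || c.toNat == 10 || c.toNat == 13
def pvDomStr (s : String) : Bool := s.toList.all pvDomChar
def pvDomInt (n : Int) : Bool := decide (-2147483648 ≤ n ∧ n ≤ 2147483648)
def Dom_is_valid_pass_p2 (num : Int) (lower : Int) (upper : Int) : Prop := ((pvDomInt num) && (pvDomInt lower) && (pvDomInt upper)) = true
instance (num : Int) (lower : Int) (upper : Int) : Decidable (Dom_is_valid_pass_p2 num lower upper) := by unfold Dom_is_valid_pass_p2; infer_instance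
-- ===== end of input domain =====

-- B replaces A's Counter + most_common scan by one fused pass over adjacent digit pairs that
-- tracks run lengths (simpler; run lengths equal character counts on a non-decreasing string).

-- int(c) for a one-character string: `none` is Python's ValueError; those inputs are excluded
-- by Pre_, so the `.getD 0` default is never reached on admitted inputs (both ports use it).
def pvCharInt (c : Char) : Int := (PySem.Int.ofChars? [c]).getD 0

-- ===== PORT A =====
-- the for-loop over strnum: early `return False` is `none`; state = (lastnum, cnt)
def pvALoop : List Char → Char → PySem.Dict Char Int → Option (PySem.Dict Char Int)
  | [], _, cnt => some cnt
  | c :: rest, last, cnt =>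
      if pvCharInt c < pvCharInt last then none
      else pvALoop rest c (cnt.modify c 0 (· + 1))

-- the final for-loop over counts
def pvAScan : List (Char × Int) → Bool
  | [] => false
  | p :: rest => if p.2 == 2 then true else pvAScan rest

def is_valid_pass_p2 (num : Int) (lower : Int) (upper : Int) : Bool :=
  if (PySem.Int.toChars num).length ≠ 6 then false
  else if num < lower || upper < num then false
  else
    let strnum := PySem.Int.toChars num
    let lastnum := strnum.headD ' '   -- strnum[0]; strnum ≠ [] because its length is 6
    match pvALoop strnum lastnum PySem.Dict.empty with
    | none => false
    | some cnt =>
        -- cnt.most_common(): items sorted by count, descending, stable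
        pvAScan (PySem.List.sorted cnt.items (fun p => p.2) true)

-- ===== PORT B =====
-- the for-loop over zip(s, s[1:]): early `return False` is the `false` branch;
-- state = (has_double, run)
def pvBLoop : List (Char × Char) → Bool → Int → Bool
  | [], hd, run => hd || run == 2
  | (a, b) :: rest, hd, run =>
      if pvCharInt b < pvCharInt a then false
      else if b == a then pvBLoop rest hd (run + 1)
      else pvBLoop rest (hd || run == 2) 1

def is_valid_pass_p2_alt (num : Int) (lower : Int) (upper : Int) : Bool :=
  let s := PySem.Int.toChars num
  if s.length ≠ 6 then false
  else if num < lower || upper < num then false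
  else pvBLoop (s.zip (PySem.List.slice s (some 1) none)) false 1   -- zip(s, s[1:])

-- ===== PRECONDITION & SPEC =====
-- Pre_ excludes exactly the inputs where a NEGATIVE num has a 6-character str and lies in
-- [lower, upper]: there A reaches int('-') and raises ValueError (and B raises it too).
def Pre_is_valid_pass_p2 (num : Int) (lower : Int) (upper : Int) : Prop :=
  (PySem.Int.toChars num).length = 6 → lower ≤ num → num ≤ upper → 0 ≤ num
instance (num : Int) (lower : Int) (upper : Int) : Decidable (Pre_is_valid_pass_p2 num lower upper) := by unfold Pre_is_valid_pass_p2; infer_instance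

def pvWitness_is_valid_pass_p2 : Int × Int × Int := (123466, 100000, 999999)

def Spec_is_valid_pass_p2 (num : Int) (lower : Int) (upper : Int) (out : Bool) : Prop := out = is_valid_pass_p2_alt num lower upper
instance (num : Int) (lower : Int) (upper : Int) (out : Bool) : Decidable (Spec_is_valid_pass_p2 num lower upper out) := by unfold Spec_is_valid_pass_p2; infer_instance

-- ===== CLAIM (what is proved, stated in full; the proofs are below) =====
def Claim_equal_is_valid_pass_p2 : Prop := ∀ (num : Int) (lower : Int) (upper : Int), Dom_is_valid_pass_p2 num lower upper → Pre_is_valid_pass_p2 num lower upper → Spec_is_valid_pass_p2 num lower upper (is_valid_pass_p2 num lower upper)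

-- ===== LEMMAS AND PROOFS =====
theorem pvCharInt_digit (c : Char) (h1 : 48 ≤ c.toNat) (h2 : c.toNat ≤ 57) :
    pvCharInt c = (c.toNat : Int) - 48 := by
  rw [← Char.ofNat_toNat c]
  interval_cases hk : c.toNat <;> decide

def pvDigit (c : Char) : Prop := 48 ≤ c.toNat ∧ c.toNat ≤ 57

theorem pvDigitChar (m : Nat) : pvDigit (Nat.digitChar (m % 10)) := by
  have : m % 10 < 10 := Nat.mod_lt _ (by omega)
  interval_cases h : m % 10 <;> exact ⟨by decide, by decide⟩

theorem pvToDigitsCore_digits (f : Nat) : ∀ (m : Nat) (acc : List Char),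
    (∀ c ∈ acc, pvDigit c) → ∀ c ∈ Nat.toDigitsCore 10 f m acc, pvDigit c := by
  induction f with
  | zero => intro m acc hacc; simpa [Nat.toDigitsCore] using hacc
  | succ f ih =>
    intro m acc hacc c hc
    rw [Nat.toDigitsCore] at hc
    by_cases h : m / 10 = 0
    · simp only [h] at hc
      rcases List.mem_cons.mp hc with h' | h'
      · subst h'; exact pvDigitChar m
      · exact hacc _ h'
    · simp only [h] at hc
      exact ih (m / 10) _ (by
        intro d hd
        rcases List.mem_cons.mp hd with h' | h'
        · subst h'; exact pvDigitChar m
        · exact hacc _ h') c hc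

theorem pvToChars_digits (n : Int) (h : 0 ≤ n) : ∀ c ∈ PySem.Int.toChars n, pvDigit c := by
  have : PySem.Int.toChars n = Nat.toDigits 10 n.toNat := by
    simp [PySem.Int.toChars, not_lt.mpr h]
  rw [this, Nat.toDigits]
  exact pvToDigitsCore_digits _ _ [] (by simp)

theorem pvALoop_eq (l : List Char) : ∀ (last : Char) (cnt : PySem.Dict Char Int),
    pvALoop l last cnt =
      if List.IsChain (fun x y => pvCharInt x ≤ pvCharInt y) (last :: l)
      then some (l.foldl (fun d c => d.modify c 0 (· + 1)) cnt) else none := by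
  induction l with
  | nil => intro last cnt; simp [pvALoop]
  | cons c rest ih =>
    intro last cnt
    rw [pvALoop, ih]
    by_cases h : pvCharInt c < pvCharInt last
    · simp [List.isChain_cons_cons, h, not_le.mpr h]
    · simp [List.isChain_cons_cons, h, not_lt.mp h, List.foldl_cons]

theorem pvAScan_eq_any (l : List (Char × Int)) : pvAScan l = l.any (fun p => p.2 == 2) := by
  induction l with
  | nil => rfl
  | cons p rest ih => rw [pvAScan, ih]; by_cases h : p.2 == 2 <;> simp [h]

theorem pvBeq2 (x : Int) : (x == 2 : Bool) = decide (x = 2) := by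
  rw [Bool.eq_iff_iff]; simp

theorem pvBLoop_broken (t : List Char) : ∀ (a : Char) (hd : Bool) (run : Int),
    ¬ List.IsChain (fun x y => pvCharInt x ≤ pvCharInt y) (a :: t) →
    pvBLoop ((a :: t).zip t) hd run = false := by
  induction t with
  | nil => intro a hd run hc; exact absurd (by simp) hc
  | cons b r ih =>
    intro a hd run hc
    rw [List.isChain_cons_cons] at hc
    simp only [List.zip_cons_cons, pvBLoop]
    by_cases h : pvCharInt b < pvCharInt a
    · simp [h]
    · have hab : pvCharInt a ≤ pvCharInt b := not_lt.mp h
      have hcr : ¬ List.IsChain (fun x y => pvCharInt x ≤ pvCharInt y) (b :: r) := by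
        intro hh; exact hc ⟨hab, hh⟩
      by_cases hba : b == a <;> simp [h, hba, ih b _ _ hcr]

theorem pvBLoop_inv (t : List Char) : ∀ (a : Char) (hd : Bool) (run : Int),
    (∀ c ∈ a :: t, pvDigit c) →
    List.Pairwise (fun x y => pvCharInt x ≤ pvCharInt y) (a :: t) →
    pvBLoop ((a :: t).zip t) hd run =
      (hd || decide (run + (t.count a : Int) = 2) ||
       decide (∃ c ∈ t, c ≠ a ∧ t.count c = 2)) := by
  induction t with
  | nil =>
    intro a hd run _ _
    simp only [List.zip_nil_right, pvBLoop, List.count_nil, List.not_mem_nil, pvBeq2,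
      Nat.cast_zero, add_zero, false_and, exists_false, decide_false, Bool.or_false]
  | cons b r ih =>
    intro a hd run hdig hp
    have hdigb : ∀ c ∈ b :: r, pvDigit c := fun c hc => hdig c (List.mem_cons_of_mem a hc)
    have hpb : List.Pairwise (fun x y => pvCharInt x ≤ pvCharInt y) (b :: r) := hp.tail
    have hab : pvCharInt a ≤ pvCharInt b := (List.pairwise_cons.mp hp).1 b (by simp)
    simp only [List.zip_cons_cons, pvBLoop, if_neg (not_lt.mpr hab)]
    by_cases hba : b = a
    · subst hba
      rw [if_pos (by simp), ih b hd (run + 1) hdigb hpb]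
      have h1 : (run + 1 + (r.count b : Int) = 2) ↔ (run + ((b :: r).count b : Int) = 2) := by
        rw [List.count_cons_self]; push_cast; omega
      have h2 : (∃ c ∈ r, c ≠ b ∧ r.count c = 2) ↔
          (∃ c ∈ b :: r, c ≠ b ∧ (b :: r).count c = 2) := by
        constructor
        · rintro ⟨c, hc, hne, hcnt⟩
          exact ⟨c, List.mem_cons_of_mem b hc, hne, by rwa [List.count_cons_of_ne (Ne.symm hne)]⟩
        · rintro ⟨c, hc, hne, hcnt⟩
          rcases List.mem_cons.mp hc with rfl | hc'
          · exact absurd rfl hne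
          · exact ⟨c, hc', hne, by rwa [List.count_cons_of_ne (Ne.symm hne)] at hcnt⟩
      simp only [h1, h2]
    · -- b ≠ a: a occurs nowhere in b :: r
      have hdiga := hdig a (by simp)
      have hdigb' := hdig b (by simp)
      have hne : pvCharInt a ≠ pvCharInt b := by
        intro he
        apply hba
        apply Char.ext
        apply UInt32.toNat_inj.mp
        rw [pvCharInt_digit a hdiga.1 hdiga.2, pvCharInt_digit b hdigb'.1 hdigb'.2] at he
        simp only [Char.toNat] at he
        omega
      have hlt : pvCharInt a < pvCharInt b := lt_of_le_of_ne hab hne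
      have hbelow : ∀ c ∈ b :: r, pvCharInt a < pvCharInt c := by
        intro c hc
        rcases List.mem_cons.mp hc with rfl | hc'
        · exact hlt
        · exact lt_of_lt_of_le hlt ((List.pairwise_cons.mp hpb).1 c hc')
      have hnotmem : a ∉ b :: r := fun hmem => lt_irrefl _ (hbelow a hmem)
      have hcount0 : (b :: r).count a = 0 := List.count_eq_zero.mpr hnotmem
      rw [if_neg (by simp [hba]), ih b (hd || run == 2) 1 hdigb hpb, pvBeq2]
      rw [Bool.eq_iff_iff]
      simp only [Bool.or_eq_true, decide_eq_true_eq]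
      have hEb : (∃ c ∈ b :: r, c ≠ a ∧ (b :: r).count c = 2) ↔
          ((1 + (r.count b : Int) = 2) ∨ ∃ c ∈ r, c ≠ b ∧ r.count c = 2) := by
        constructor
        · rintro ⟨c, hc, hnea, hcnt⟩
          rcases List.mem_cons.mp hc with rfl | hc'
          · left; rw [List.count_cons_self] at hcnt; omega
          · by_cases hcb : c = b
            · subst hcb; left; rw [List.count_cons_self] at hcnt; omega
            · right; exact ⟨c, hc', hcb, by rwa [List.count_cons_of_ne (Ne.symm hcb)] at hcnt⟩
        · rintro (h | ⟨c, hc, hcb, hcnt⟩)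
          · refine ⟨b, by simp, fun hh => hba hh, ?_⟩
            rw [List.count_cons_self]; omega
          · have hca : c ≠ a := fun hh =>
              (lt_irrefl _ (hh ▸ hbelow c (List.mem_cons_of_mem b hc))).elim
            exact ⟨c, List.mem_cons_of_mem b hc, hca, by rwa [List.count_cons_of_ne (Ne.symm hcb)]⟩
      rw [hEb, hcount0]
      simp only [Nat.cast_zero, add_zero]
      rw [or_assoc]

theorem pvAScan_counter (l : List Char) :
    pvAScan (PySem.List.sorted (PySem.Dict.counter l).items (fun p => p.2) true)
      = decide (∃ c ∈ l, l.count c = 2) := by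
  rw [pvAScan_eq_any, Bool.eq_iff_iff]
  simp only [List.any_eq_true, PySem.List.mem_sorted, PySem.Dict.items_counter, List.mem_map,
    decide_eq_true_eq, beq_iff_eq, PySem.Set.mem_ofList]
  constructor
  · rintro ⟨p, ⟨c, hc, rfl⟩, h2⟩
    refine ⟨c, hc, ?_⟩
    have h2' : (l.count c : Int) = 2 := h2
    exact_mod_cast h2' 
  · rintro ⟨c, hc, h2⟩
    refine ⟨(c, (l.count c : Int)), ⟨c, hc, rfl⟩, ?_⟩
    show (l.count c : Int) = 2
    exact_mod_cast h2

theorem pvMain : ∀ (num lower upper : Int),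
    ((PySem.Int.toChars num).length = 6 → lower ≤ num → num ≤ upper → 0 ≤ num) →
    is_valid_pass_p2 num lower upper = is_valid_pass_p2_alt num lower upper := by
  intro num lower upper hpre
  unfold is_valid_pass_p2 is_valid_pass_p2_alt
  by_cases h6 : (PySem.Int.toChars num).length = 6
  · simp only [h6, ne_eq, not_true_eq_false, if_false]
    by_cases hr : (num < lower || upper < num) = true
    · simp [hr]
    · simp only [hr]
      have hrr := Bool.or_eq_false_iff.mp (Bool.not_eq_true _ |>.mp hr)
      have hnum : 0 ≤ num := hpre h6 (by have := of_decide_eq_false hrr.1; omega) (by have := of_decide_eq_false hrr.2; omega)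
      obtain ⟨a, t, hat⟩ : ∃ a t, PySem.Int.toChars num = a :: t := by
        cases h : PySem.Int.toChars num with
        | nil => rw [h] at h6; simp at h6
        | cons a t => exact ⟨a, t, rfl⟩
      have hdig : ∀ c ∈ a :: t, pvDigit c := by
        rw [← hat]; exact pvToChars_digits num hnum
      simp only [Bool.false_eq_true, if_false, hat, List.headD_cons, PySem.List.slice_from_one,
        List.tail_cons]
      rw [pvALoop_eq]
      have hCiff : List.IsChain (fun x y => pvCharInt x ≤ pvCharInt y) (a :: a :: t) ↔
          List.IsChain (fun x y => pvCharInt x ≤ pvCharInt y) (a :: t) := by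
        rw [List.isChain_cons_cons]
        simp
      by_cases hchain : List.IsChain (fun x y => pvCharInt x ≤ pvCharInt y) (a :: t)
      · rw [if_pos (hCiff.mpr hchain)]
        have hcnt : (a :: t).foldl (fun d c => d.modify c 0 (· + 1)) PySem.Dict.empty
            = PySem.Dict.counter (a :: t) := rfl
        rw [hcnt]
        show pvAScan (PySem.List.sorted (PySem.Dict.counter (a :: t)).items (fun p => p.2) true) = _
        rw [pvAScan_counter]
        haveI : Trans (fun x y => pvCharInt x ≤ pvCharInt y) (fun x y => pvCharInt x ≤ pvCharInt y)
            (fun x y => pvCharInt x ≤ pvCharInt y) := ⟨fun h1 h2 => le_trans h1 h2⟩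
        rw [pvBLoop_inv t a false 1 hdig (List.isChain_iff_pairwise.mp hchain)]
        rw [Bool.eq_iff_iff]
        simp only [Bool.or_eq_true, decide_eq_true_eq, Bool.false_or]
        constructor
        · rintro ⟨c, hc, h2⟩
          rcases List.mem_cons.mp hc with rfl | hc'
          · left; rw [List.count_cons_self] at h2; omega
          · by_cases hca : c = a
            · subst hca; left; rw [List.count_cons_self] at h2; omega
            · right; exact ⟨c, hc', hca, by rwa [List.count_cons_of_ne (Ne.symm hca)] at h2⟩
        · rintro (h | ⟨c, hc, hca, h2⟩)
          · refine ⟨a, by simp, ?_⟩; rw [List.count_cons_self]; omega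
          · exact ⟨c, List.mem_cons_of_mem a hc, by rwa [List.count_cons_of_ne (Ne.symm hca)]⟩
      · rw [if_neg (fun hh => hchain (hCiff.mp hh))]
        rw [pvBLoop_broken t a false 1 hchain]
  · simp [h6]

-- ===== VERDICT (by name: the statement is the Claim_ definition above) =====
theorem is_valid_pass_p2_spec : Claim_equal_is_valid_pass_p2 := by
  intro num lower upper _ hpre
  unfold Spec_is_valid_pass_p2
  exact pvMain num lower upper hpre
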